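-- pv_equiv track=rewrite | github.com/MicheleTirico/analysisTools | simulation/symuvia_run_with_rerouting.py | __get_path_outSchools
-- ===== SOURCE A (Python) =====
-- def __get_path_outSchools(shortPaths,schools):
--     pos=[]
--     i=0
--     while i <len(shortPaths):
--         for s in schools:
--             if s in shortPaths[i] :
--                 pos.append(i)
--         i+=1
--     return [item for idx, item in enumerate(shortPaths) if idx not in pos]
-- ===== SOURCE B (Python) =====
-- def __get_path_outSchools(shortPaths, schools):
--     return [p for p in shortPaths if not any(s in p for s in schools)]
-- ===== Notes on version B (the rewrite author's own statement) =====
-- stated objective: simpler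
-- what changed: Drops the index list `pos` entirely: a single comprehension keeps each path iff no school is a member, instead of first collecting bad indices in a while/for loop and then filtering by an `idx not in pos` list scan.
import Mathlib
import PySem

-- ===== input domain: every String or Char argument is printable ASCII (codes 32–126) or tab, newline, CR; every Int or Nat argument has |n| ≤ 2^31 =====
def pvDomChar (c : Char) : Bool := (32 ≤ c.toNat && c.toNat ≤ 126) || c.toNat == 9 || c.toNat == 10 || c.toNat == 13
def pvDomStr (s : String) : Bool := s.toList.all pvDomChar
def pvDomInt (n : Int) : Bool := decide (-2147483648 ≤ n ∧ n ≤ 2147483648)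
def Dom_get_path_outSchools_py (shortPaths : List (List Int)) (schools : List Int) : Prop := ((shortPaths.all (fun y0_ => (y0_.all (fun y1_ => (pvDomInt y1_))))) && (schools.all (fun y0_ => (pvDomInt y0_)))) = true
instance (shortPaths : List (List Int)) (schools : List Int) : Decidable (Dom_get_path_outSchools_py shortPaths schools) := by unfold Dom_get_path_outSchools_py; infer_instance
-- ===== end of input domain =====

-- ===== PORT A =====
-- B replaces A's index-list construction with a direct membership filter (same return value, no speed claim).
-- A: while loop over indices collecting, for every matching school, the index into `pos`;
--    then keep enumerate entries whose index is not in `pos`.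
def get_path_outSchools_py (shortPaths : List (List Int)) (schools : List Int) : List (List Int) :=
  let pos : List Int :=
    (List.range shortPaths.length).foldl
      (fun pos i =>
        schools.foldl (fun pos s => if s ∈ shortPaths.getD i [] then pos ++ [(i : Int)] else pos) pos)
      []
  ((shortPaths.zipIdx.filter (fun p => !(pos.contains ((p.2 : Nat) : Int)))).map (·.1))

-- ===== PORT B =====
-- B: one comprehension, keep p iff no school is a member of p.
def get_path_outSchools_py_alt (shortPaths : List (List Int)) (schools : List Int) : List (List Int) :=
  shortPaths.filter (fun p => !(schools.any (fun s => p.contains s)))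

-- ===== PRECONDITION & SPEC =====
def Spec_get_path_outSchools_py (shortPaths : List (List Int)) (schools : List Int) (out : List (List Int)) : Prop := out = get_path_outSchools_py_alt shortPaths schools
instance (shortPaths : List (List Int)) (schools : List Int) (out : List (List Int)) : Decidable (Spec_get_path_outSchools_py shortPaths schools out) := by unfold Spec_get_path_outSchools_py; infer_instance

-- ===== CLAIM (what is proved, stated in full; the proofs are below) =====
def Claim_equal_get_path_outSchools_py : Prop := ∀ (shortPaths : List (List Int)) (schools : List Int), Dom_get_path_outSchools_py shortPaths schools → Spec_get_path_outSchools_py shortPaths schools (get_path_outSchools_py shortPaths schools)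

-- ===== LEMMAS AND PROOFS =====

-- membership in the inner for-loop's accumulator
lemma inner_mem (schools path : List Int) (j x : Int) (pos : List Int) :
    x ∈ schools.foldl (fun pos s => if s ∈ path then pos ++ [j] else pos) pos ↔
      x ∈ pos ∨ (x = j ∧ ∃ s ∈ schools, s ∈ path) := by
  induction schools generalizing pos with
  | nil => simp
  | cons s ss ih =>
    simp only [List.foldl_cons]
    by_cases hs : s ∈ path
    · simp only [if_pos hs, ih, List.mem_append, List.mem_singleton]
      constructor
      · rintro ((h | h) | h)
        · exact Or.inl h
        · exact Or.inr ⟨h, s, by simp, hs⟩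
        · rcases h with ⟨hx, t, ht, htp⟩
          exact Or.inr ⟨hx, t, by simp [ht], htp⟩
      · rintro (h | ⟨hx, t, ht, htp⟩)
        · exact Or.inl (Or.inl h)
        · rcases List.mem_cons.mp ht with h | h
          · exact Or.inl (Or.inr hx)
          · exact Or.inr ⟨hx, t, h, htp⟩
    · simp only [if_neg hs, ih]
      constructor
      · rintro (h | ⟨hx, t, ht, htp⟩)
        · exact Or.inl h
        · exact Or.inr ⟨hx, t, by simp [ht], htp⟩
      · rintro (h | ⟨hx, t, ht, htp⟩)
        · exact Or.inl h
        · rcases List.mem_cons.mp ht with h | h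
          · exact absurd (h ▸ htp) hs
          · exact Or.inr ⟨hx, t, h, htp⟩

-- membership in `pos` after the while loop over indices 0..n-1
lemma pos_mem (shortPaths : List (List Int)) (schools : List Int) (n : Nat) (x : Int) :
    x ∈ (List.range n).foldl
        (fun pos i =>
          schools.foldl (fun pos s => if s ∈ shortPaths.getD i [] then pos ++ [(i : Int)] else pos) pos)
        [] ↔
      ∃ i < n, x = (i : Int) ∧ ∃ s ∈ schools, s ∈ shortPaths.getD i [] := by
  induction n with
  | zero => simp
  | succ n ih =>
    rw [List.range_succ, List.foldl_append]
    simp only [List.foldl_cons, List.foldl_nil]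
    rw [inner_mem, ih]
    constructor
    · rintro (⟨i, hi, rest⟩ | ⟨hx, hs⟩)
      · exact ⟨i, by omega, rest⟩
      · exact ⟨n, by omega, hx, hs⟩
    · rintro ⟨i, hi, hx, hs⟩
      by_cases h : i < n
      · exact Or.inl ⟨i, h, hx, hs⟩
      · have : i = n := by omega
        subst this
        exact Or.inr ⟨hx, hs⟩

-- filtering enumerate-with-index by a predicate on the index equals filtering by a
-- predicate on the element, when they agree on every (element, index) pair present
lemma filter_zipIdx {α : Type} (xs : List α) (f : Nat → Bool) (g : α → Bool) (k : Nat)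
    (h : ∀ p ∈ xs.zipIdx k, f p.2 = g p.1) :
    ((xs.zipIdx k).filter (fun p => f p.2)).map (·.1) = xs.filter g := by
  induction xs generalizing k with
  | nil => simp
  | cons x xs ih =>
    have hx : f k = g x := h (x, k) (by simp [List.zipIdx])
    have hrest : ∀ p ∈ xs.zipIdx (k + 1), f p.2 = g p.1 := by
      intro p hp
      exact h p (by simp [List.zipIdx] at hp ⊢; tauto)
    simp only [List.zipIdx_cons, List.filter_cons, hx]
    by_cases hg : g x
    · simp [hg, ih (k+1) hrest]
    · simp [hg, ih (k+1) hrest]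

-- ===== VERDICT (by name: the statement is the Claim_ definition above) =====
theorem get_path_outSchools_py_spec : Claim_equal_get_path_outSchools_py := by
  intro shortPaths schools _
  show get_path_outSchools_py shortPaths schools = get_path_outSchools_py_alt shortPaths schools
  unfold get_path_outSchools_py get_path_outSchools_py_alt
  dsimp only
  refine filter_zipIdx shortPaths
    (fun i => !((List.foldl
        (fun pos i =>
          schools.foldl (fun pos s => if s ∈ shortPaths.getD i [] then pos ++ [(i : Int)] else pos) pos)
        [] (List.range shortPaths.length)).contains ((i : Nat) : Int)))
    (fun p => !(schools.any (fun s => p.contains s))) 0 ?_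
  rintro ⟨a, i⟩ hp
  dsimp only
  have hmem := List.mem_zipIdx hp
  simp only at hmem
  obtain ⟨-, hi, hget⟩ := hmem
  simp only [Nat.zero_add] at hi
  simp only [Nat.sub_zero] at hget
  have hD : shortPaths.getD i [] = a := by
    rw [hget]; exact List.getD_eq_getElem shortPaths [] hi
  suffices h : ((List.foldl
      (fun pos i =>
        schools.foldl (fun pos s => if s ∈ shortPaths.getD i [] then pos ++ [(i : Int)] else pos) pos)
      [] (List.range shortPaths.length)).contains ((i : Nat) : Int))
      = schools.any (fun s => a.contains s) by
    rw [h]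
  rw [Bool.eq_iff_iff]
  simp only [List.contains_iff_mem, List.any_eq_true]
  rw [pos_mem]
  constructor
  · rintro ⟨j, hj, hij, s, hs, hsp⟩
    have : j = i := by exact_mod_cast hij.symm
    subst this
    exact ⟨s, hs, hD ▸ hsp⟩
  · rintro ⟨s, hs, hsa⟩
    exact ⟨i, hi, rfl, s, hs, hD ▸ hsa⟩
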